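-- pv_equiv track=rewrite | github.com/lionelcinnamon/AnsonOCR | utils/data_utils.py | _required_length
-- ===== SOURCE A (Python) =====
-- def _required_length(label):
--     length = len(label)
--
--     if length == 1:
--         return length
--     else:
--         require = length
--         for i in range(1, length):
--             if label[i] == label[i-1]:
--                 require = require + 1
--
--     return require
-- ===== SOURCE B (Python) =====
-- def _required_length(label):
--     # divide and conquer: required length of a segment [lo, hi) is its length
--     # plus the number of adjacent equal pairs, which splits additively at any
--     # cut point (one extra boundary pair if the halves touch with equal chars).
--     def go(lo, hi):
--         if hi - lo <= 1:
--             return hi - lo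
--         mid = (lo + hi) // 2
--         extra = 1 if label[mid - 1] == label[mid] else 0
--         return go(lo, mid) + go(mid, hi) + extra
--     return go(0, len(label))
-- ===== Notes on version B (the rewrite author's own statement) =====
-- stated objective: alternative
-- what changed: B replaces A's left-to-right indexed pair-scan by a divide-and-conquer recursion: it splits the string at the midpoint, solves each half recursively, and adds one extra unit when the boundary characters are equal, using the additivity of adjacent-equal pairs over a cut.
import Mathlib
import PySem

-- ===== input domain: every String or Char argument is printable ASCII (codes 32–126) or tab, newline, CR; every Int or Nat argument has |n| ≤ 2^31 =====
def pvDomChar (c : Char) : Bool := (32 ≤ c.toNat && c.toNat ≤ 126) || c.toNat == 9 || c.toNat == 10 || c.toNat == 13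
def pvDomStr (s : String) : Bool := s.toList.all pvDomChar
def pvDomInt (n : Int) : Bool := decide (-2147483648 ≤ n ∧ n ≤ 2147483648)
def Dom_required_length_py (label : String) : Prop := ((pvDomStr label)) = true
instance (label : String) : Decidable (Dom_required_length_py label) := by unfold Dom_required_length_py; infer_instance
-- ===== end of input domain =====

-- B computes the same value (length + adjacent-equal pairs) by divide-and-conquer recursion
-- on the index interval instead of A's linear indexed pair-scan; alternative decomposition, same cost.

-- ===== PORT A =====
def required_length_py (label : String) : Int :=
  let length : Int := PySem.Str.len label
  if length = 1 then length
  else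
    (PySem.List.pyRange 1 length 1).foldl
      (fun require i =>
        if PySem.Str.pyGet? label i = PySem.Str.pyGet? label (i - 1) then require + 1
        else require)
      length

-- ===== PORT B =====
-- B's recursion `go(lo, hi)`; the Nat fuel only guarantees totality (the recursion depth is
-- at most hi - lo, which is the fuel supplied at the call site), it changes no computed value.
def required_length_py_alt_go (label : String) : Nat → Int → Int → Int
  | 0, lo, hi => hi - lo
  | f + 1, lo, hi =>
    if hi - lo ≤ 1 then hi - lo
    else
      let mid := PySem.Int.floordiv (lo + hi) 2
      let extra : Int :=
        if PySem.Str.pyGet? label (mid - 1) = PySem.Str.pyGet? label mid then 1 else 0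
      required_length_py_alt_go label f lo mid + required_length_py_alt_go label f mid hi + extra

def required_length_py_alt (label : String) : Int :=
  required_length_py_alt_go label (PySem.Str.len label).toNat 0 (PySem.Str.len label)

-- ===== PRECONDITION & SPEC =====
def Spec_required_length_py (label : String) (out : Int) : Prop := out = required_length_py_alt label
instance (label : String) (out : Int) : Decidable (Spec_required_length_py label out) := by unfold Spec_required_length_py; infer_instance

-- ===== CLAIM (what is proved, stated in full; the proofs are below) =====
def Claim_equal_required_length_py : Prop := ∀ (label : String), Dom_required_length_py label → Spec_required_length_py label (required_length_py label)

-- ===== LEMMAS AND PROOFS =====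

/-- B's recursion computes the interval length plus the count of boundary indices
    `i ∈ (lo, hi)` whose character equals its predecessor's, given enough fuel. -/
lemma alt_go_eq_count (label : String) : ∀ (f : Nat) (lo hi : Int), (hi - lo).toNat ≤ f →
    required_length_py_alt_go label f lo hi
      = (hi - lo) + ((PySem.List.pyRange (lo + 1) hi 1).countP
          (fun i => decide (PySem.Str.pyGet? label (i - 1) = PySem.Str.pyGet? label i)) : Int) := by
  intro f
  induction f with
  | zero =>
      intro lo hi hf
      rw [required_length_py_alt_go, PySem.List.pyRange_one_eq_nil (by omega)]
      simp
  | succ f ih =>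
      intro lo hi hf
      rw [required_length_py_alt_go]
      by_cases hb : hi - lo ≤ 1
      · rw [if_pos hb, PySem.List.pyRange_one_eq_nil (by omega)]
        simp
      · have hm := PySem.Int.floordiv_eq_ediv_of_pos (a := lo + hi) (b := 2) (by omega)
        have h1 : lo + 1 ≤ PySem.Int.floordiv (lo + hi) 2 := by omega
        have h2 : PySem.Int.floordiv (lo + hi) 2 < hi := by omega
        rw [if_neg hb]
        set mid := PySem.Int.floordiv (lo + hi) 2 with hmid
        have hsplit : PySem.List.pyRange (lo + 1) hi 1
            = PySem.List.pyRange (lo + 1) mid 1 ++ (mid :: PySem.List.pyRange (mid + 1) hi 1) := by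
          rw [PySem.List.pyRange_one_append (a := lo + 1) (m := mid) (b := hi) h1 (by omega),
            PySem.List.pyRange_one_cons h2]
        simp only [ih lo mid (by omega), ih mid hi (by omega), hsplit,
          List.countP_append, List.countP_cons, decide_eq_true_eq]
        split_ifs with hc
        · push_cast; omega
        · push_cast; omega

-- ===== VERDICT (by name: the statement is the Claim_ definition above) =====
theorem required_length_py_spec : Claim_equal_required_length_py := by
  unfold Claim_equal_required_length_py Spec_required_length_py
  intro label _
  unfold required_length_py required_length_py_alt
  rw [alt_go_eq_count label (PySem.Str.len label).toNat 0 (PySem.Str.len label) (by omega)]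
  have hcong : ((PySem.List.pyRange (0 + 1) (PySem.Str.len label) 1).countP
        (fun i => decide (PySem.Str.pyGet? label (i - 1) = PySem.Str.pyGet? label i)))
      = ((PySem.List.pyRange 1 (PySem.Str.len label) 1).countP
        (fun i => decide (PySem.Str.pyGet? label i = PySem.Str.pyGet? label (i - 1)))) := by
    rw [show (0 : Int) + 1 = 1 by ring]
    exact List.countP_congr (fun i _ => by simp [eq_comm])
  rw [hcong]
  by_cases h1 : PySem.Str.len label = 1
  · rw [if_pos h1, h1, PySem.List.pyRange_one_eq_nil le_rfl]
    simp
  · rw [if_neg h1, PySem.List.foldl_ite_add_one]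
    omega
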